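-- pv_equiv track=rewrite | github.com/gfcharles/euler | python/prime.py | lcm_by_factor_maps
-- ===== SOURCE A (Python) =====
-- def multiply(factor_map:dict) -> int:
--     prod = 1
--     for fact, exp in factor_map.items():
--         prod *= (fact ** exp)
--
--     return prod
--
-- def lcm_by_factor_maps(factor_maps) -> int:
--     merged = dict()
--     for factor_map in factor_maps:
--         for fact in factor_map:
--             exp = factor_map[fact]
--
--             if fact in merged.keys():
--                 merged[fact] = max(merged[fact], exp)
--             else:
--                 merged[fact] = exp
--
--     return multiply(merged)
-- ===== SOURCE B (Python) =====
-- def lcm_by_factor_maps(factor_maps) -> int: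
--     facts = list(dict.fromkeys(f for fm in factor_maps for f in fm))
--     result = 1
--     for f in facts:
--         result *= f ** max(fm[f] for fm in factor_maps if f in fm)
--     return result
-- ===== Notes on version B (the rewrite author's own statement) =====
-- stated objective: simpler
-- what changed: B drops A's incrementally merged exponent dictionary: it dedups the factors in first-occurrence order and multiplies f ** max(fm[f] for fm in factor_maps if f in fm) directly.
-- outside the precondition, e.g. on lcm_by_factor_maps([{2: -1}]): A returns 0.5, B returns 0.5; on lcm_by_factor_maps([{0: -1}]): A raises ZeroDivisionError, B raises ZeroDivisionError
import Mathlib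
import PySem

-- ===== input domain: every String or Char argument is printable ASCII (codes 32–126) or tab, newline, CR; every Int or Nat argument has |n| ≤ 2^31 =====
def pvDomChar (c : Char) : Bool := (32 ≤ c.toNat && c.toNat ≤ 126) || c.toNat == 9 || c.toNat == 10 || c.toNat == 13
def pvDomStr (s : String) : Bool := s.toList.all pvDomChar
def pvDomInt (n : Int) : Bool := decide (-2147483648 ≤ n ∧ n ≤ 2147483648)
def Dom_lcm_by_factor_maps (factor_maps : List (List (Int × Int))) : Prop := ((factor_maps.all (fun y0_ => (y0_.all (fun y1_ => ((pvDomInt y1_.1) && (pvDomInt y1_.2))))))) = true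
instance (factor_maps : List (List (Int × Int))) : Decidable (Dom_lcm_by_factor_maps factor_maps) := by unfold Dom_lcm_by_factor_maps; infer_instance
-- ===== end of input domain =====

-- B replaces A's merged exponent dictionary by an ordered dedup of the factors and a per-factor
-- max scan over the maps (objective: simpler; not faster).


-- boundary conversion shared by both ports: each factor_map argument is a Python dict,
-- built from the association list with Python's semantics (a later duplicate key overwrites)
def pvToDict (fm : List (Int × Int)) : PySem.Dict Int Int :=
  fm.foldl (fun d p => d.insert p.1 p.2) PySem.Dict.empty

-- f ** e, exact for 0 ≤ e (Pre_ guarantees this; for e < 0 Python leaves the integers)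
def pvPow (f e : Int) : Int := f ^ e.toNat

-- ===== PORT A =====
def multiply (factor_map : PySem.Dict Int Int) : Int :=
  factor_map.items.foldl (fun prod p => prod * pvPow p.1 p.2) 1

def lcm_by_factor_maps (factor_maps : List (List (Int × Int))) : Int :=
  let merged : PySem.Dict Int Int :=
    factor_maps.foldl (fun merged fm =>
      let d := pvToDict fm
      d.keys.foldl (fun merged fact =>
        let exp := d.getD fact 0
        if merged.contains fact then merged.insert fact (max (merged.getD fact 0) exp)
        else merged.insert fact exp) merged) PySem.Dict.empty
  multiply merged

-- ===== PORT B =====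
-- max(fm[f] for fm in factor_maps if f in fm); the generator is nonempty for every f that occurs
def pvMaxExp (factor_maps : List (List (Int × Int))) (f : Int) : Int :=
  ((PySem.List.max?
      ((factor_maps.filter (fun fm => (pvToDict fm).contains f)).map
        (fun fm => (pvToDict fm).getD f 0)) (fun x => x)).getD 0)

def lcm_by_factor_maps_alt (factor_maps : List (List (Int × Int))) : Int :=
  let facts := PySem.List.dedup (factor_maps.flatMap (fun fm => (pvToDict fm).keys))
  facts.foldl (fun result f => result * pvPow f (pvMaxExp factor_maps f)) 1

-- ===== PRECONDITION & SPEC =====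
-- the value the Python dict built from fm holds at key f (last duplicate wins)
def pvVal (fm : List (Int × Int)) (f : Int) : Option Int :=
  ((fm.filter (fun q => q.1 == f)).map (fun q => q.2)).getLast?

-- Pre_ excludes exactly the inputs on which some factor's maximal merged exponent is negative:
-- there Python A returns a float (f ** e with e < 0) or raises ZeroDivisionError (f = 0), never an Int.
def Pre_lcm_by_factor_maps (factor_maps : List (List (Int × Int))) : Prop :=
  ∀ fm ∈ factor_maps, ∀ p ∈ fm, ∃ fm' ∈ factor_maps,
    ((pvVal fm' p.1).any (fun e => decide (0 ≤ e))) = true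
instance (factor_maps : List (List (Int × Int))) : Decidable (Pre_lcm_by_factor_maps factor_maps) := by
  unfold Pre_lcm_by_factor_maps; infer_instance

def pvWitness_lcm_by_factor_maps : (List (List (Int × Int))) := [[(2, 3), (3, 1)], [(2, 1), (5, 2)]]

def Spec_lcm_by_factor_maps (factor_maps : List (List (Int × Int))) (out : Int) : Prop := out = lcm_by_factor_maps_alt factor_maps
instance (factor_maps : List (List (Int × Int))) (out : Int) : Decidable (Spec_lcm_by_factor_maps factor_maps out) := by unfold Spec_lcm_by_factor_maps; infer_instance

-- ===== CLAIM (what is proved, stated in full; the proofs are below) =====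
def Claim_equal_lcm_by_factor_maps : Prop := ∀ (factor_maps : List (List (Int × Int))), Dom_lcm_by_factor_maps factor_maps → Pre_lcm_by_factor_maps factor_maps → Spec_lcm_by_factor_maps factor_maps (lcm_by_factor_maps factor_maps)

-- ===== LEMMAS AND PROOFS =====

-- A's merging step, written as a single insert over one (factor, exponent) pair
def pvStep (d : PySem.Dict Int Int) (p : Int × Int) : PySem.Dict Int Int :=
  d.insert p.1 (if d.contains p.1 then max (d.getD p.1 0) p.2 else p.2)

-- the (factor, exponent) pairs of all maps, one per distinct key of each map, in order
def pvPairs (factor_maps : List (List (Int × Int))) : List (Int × Int) :=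
  factor_maps.flatMap (fun fm => (pvToDict fm).items)

theorem pvToDict_nodup (fm : List (Int × Int)) : (pvToDict fm).keys.Nodup :=
  PySem.Dict.nodup_keys_foldl_insert_key fm (fun p => p.1) (fun _ p => p.2) PySem.Dict.empty
    PySem.Dict.nodup_keys_empty

theorem foldl_flatMap_dict (fms : List (List (Int × Int))) (d : PySem.Dict Int Int) :
    fms.foldl (fun m fm => (pvToDict fm).items.foldl pvStep m) d = (pvPairs fms).foldl pvStep d := by
  induction fms generalizing d with
  | nil => rfl
  | cons fm t ih =>
    simp only [pvPairs, List.flatMap_cons, List.foldl_append, List.foldl_cons]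
    exact ih _

theorem inner_eq (fm : List (Int × Int)) (m : PySem.Dict Int Int) :
    (pvToDict fm).keys.foldl (fun merged fact =>
        let exp := (pvToDict fm).getD fact 0
        if merged.contains fact then merged.insert fact (max (merged.getD fact 0) exp)
        else merged.insert fact exp) m
      = (pvToDict fm).items.foldl pvStep m := by
  conv_rhs => rw [PySem.Dict.items_eq_map_keys (pvToDict fm) (pvToDict_nodup fm) 0, List.foldl_map]
  apply PySem.List.foldl_congr_mem
  intro acc x _
  simp only [pvStep, apply_ite (acc.insert x)]

theorem mergedA_eq (fms : List (List (Int × Int))) :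
    lcm_by_factor_maps fms = multiply ((pvPairs fms).foldl pvStep PySem.Dict.empty) := by
  unfold lcm_by_factor_maps
  rw [← foldl_flatMap_dict]
  show multiply _ = multiply _
  congr 1
  exact PySem.List.foldl_congr_mem _ _ _ _ (fun acc fm _ => inner_eq fm acc)

theorem get?_foldl_pvStep (Lp : List (Int × Int)) (d : PySem.Dict Int Int) (f : Int) :
    ((Lp.foldl pvStep d).get? f) =
      ((Lp.filter (fun p => p.1 == f)).map (fun p => p.2)).foldl
        (fun o v => some (match o with | none => v | some a => max a v)) (d.get? f) := by
  induction Lp generalizing d with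
  | nil => rfl
  | cons p t ih =>
    rw [List.foldl_cons, ih]
    by_cases hk : p.1 = f
    · subst hk
      rw [List.filter_cons_of_pos (by simp), List.map_cons, List.foldl_cons]
      congr 1
      rw [pvStep, PySem.Dict.get?_insert_self, PySem.Dict.contains_eq_isSome_get?,
          PySem.Dict.getD_eq_get?_getD]
      cases d.get? p.1 <;> simp
    · have hb : (p.1 == f) = false := beq_false_of_ne hk
      rw [List.filter_cons_of_neg (by simp [hb])]
      congr 1
      rw [pvStep, PySem.Dict.get?_insert_of_ne _ _ (fun h => hk h.symm)]

theorem foldl_max_eq_max? (vs : List Int) :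
    vs.foldl (fun o v => some (match o with | none => v | some a => max a v)) none
      = PySem.List.max? vs (fun x => x) := by
  rw [PySem.List.max?]
  apply PySem.List.foldl_congr_mem
  intro acc x _
  cases acc with
  | none => rfl
  | some a => by_cases h : a < x <;> simp [h, max_def] <;> omega

theorem filter_items_nodup (d : PySem.Dict Int Int) (hnd : d.keys.Nodup) (f : Int) :
    (d.items.filter (fun p => p.1 == f)).map (fun p => p.2)
      = if d.contains f then [d.getD f 0] else [] := by
  rw [PySem.Dict.items_eq_map_keys d hnd 0, List.filter_map, List.map_map]
  have : (fun p : Int × Int => p.1 == f) ∘ (fun k => (k, d.getD k 0)) = (fun k => k == f) := rfl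
  rw [this]
  rw [List.filter_beq, PySem.Dict.contains_eq_decide_mem_keys]
  by_cases hm : f ∈ d.keys
  · rw [List.count_eq_one_of_mem hnd hm]
    simp [hm]
  · rw [List.count_eq_zero_of_not_mem hm]
    simp [hm]

theorem map_fst_pvPairs (fms : List (List (Int × Int))) :
    (pvPairs fms).map (fun p => p.1) = fms.flatMap (fun fm => (pvToDict fm).keys) := by
  rw [pvPairs, List.map_flatMap]
  rfl

theorem vals_pvPairs (fms : List (List (Int × Int))) (f : Int) :
    ((pvPairs fms).filter (fun p => p.1 == f)).map (fun p => p.2)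
      = (fms.filter (fun fm => (pvToDict fm).contains f)).map (fun fm => (pvToDict fm).getD f 0) := by
  induction fms with
  | nil => rfl
  | cons fm t ih =>
    rw [pvPairs, List.flatMap_cons, List.filter_append, List.map_append, ← pvPairs, ih,
        filter_items_nodup (pvToDict fm) (pvToDict_nodup fm) f, List.filter_cons]
    by_cases h : (pvToDict fm).contains f <;> simp [h]

theorem keys_foldl_pvStep (Lp : List (Int × Int)) (d : PySem.Dict Int Int) :
    (Lp.foldl pvStep d).keys = PySem.Set.update d.keys (Lp.map (fun p => p.1)) :=
  PySem.Dict.keys_foldl_insert_key Lp (fun p => p.1) _ d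

theorem nodup_foldl_pvStep (Lp : List (Int × Int)) (d : PySem.Dict Int Int) (h : d.keys.Nodup) :
    (Lp.foldl pvStep d).keys.Nodup :=
  PySem.Dict.nodup_keys_foldl_insert_key Lp (fun p => p.1) _ d h

theorem getD_merged_eq_pvMaxExp (fms : List (List (Int × Int))) (f : Int) :
    ((pvPairs fms).foldl pvStep PySem.Dict.empty).getD f 0 = pvMaxExp fms f := by
  rw [PySem.Dict.getD_eq_get?_getD, get?_foldl_pvStep, PySem.Dict.get?_empty,
      foldl_max_eq_max?, vals_pvPairs]
  rfl

theorem multiply_merged_eq_alt (fms : List (List (Int × Int))) :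
    multiply ((pvPairs fms).foldl pvStep PySem.Dict.empty) = lcm_by_factor_maps_alt fms := by
  rw [multiply,
      PySem.Dict.items_eq_map_keys _ (nodup_foldl_pvStep _ _ PySem.Dict.nodup_keys_empty) 0,
      List.foldl_map, keys_foldl_pvStep, PySem.Dict.keys_empty, map_fst_pvPairs]
  rw [lcm_by_factor_maps_alt]
  show _ = List.foldl _ 1 (PySem.List.dedup _)
  rw [PySem.List.dedup]
  show List.foldl _ 1 (PySem.Set.update PySem.Set.empty _) = _
  rw [PySem.Set.update, PySem.Set.ofList]
  apply PySem.List.foldl_congr_mem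
  intro acc x _
  rw [getD_merged_eq_pvMaxExp]

-- ===== VERDICT (by name: the statement is the Claim_ definition above) =====
theorem lcm_by_factor_maps_spec : Claim_equal_lcm_by_factor_maps := by
  intro fms _ _
  unfold Spec_lcm_by_factor_maps
  rw [mergedA_eq, multiply_merged_eq_alt]
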